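-- pv_equiv track=rewrite | github.com/yjlee0235/algorithm | python/jordy_study/programmers/디펜스게임.py | solution
-- ===== SOURCE A (Python) =====
-- import heapq
--
-- def solution(n, k, enemy):
--     answer = 0
--     pq = []
--
--     if len(enemy) <= k:
--         return len(enemy)
--
--     pass_count = 0
--     tmp = 0
--     for i in range(len(enemy)):
--         heapq.heappush(pq, -enemy[i])
--         if tmp + enemy[i] <= n:
--             tmp += enemy[i]
--             answer += 1
--         else:
--             if k > pass_count:
--                 pass_count += 1
--                 max_minus_value = heapq.heappop(pq)
--                 tmp += max_minus_value + enemy[i]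
--                 if tmp <= n:
--                     answer += 1
--             else:
--                 break
--     return answer
-- ===== SOURCE B (Python) =====
-- import heapq
--
--
-- def solution(n, k, enemy):
--     # Canonical bounded min-heap greedy: keep the k largest enemies seen so far
--     # immunized; every time the heap overflows, the smallest overflow wave is
--     # paid with health.  Return the index of the first unpayable wave.
--     pq = []
--     for i, e in enumerate(enemy):
--         heapq.heappush(pq, e)
--         if len(pq) > k:
--             n -= heapq.heappop(pq)
--             if n < 0:
--                 return i
--     return len(enemy)
-- ===== Notes on version B (the rewrite author's own statement) =====
-- stated objective: simpler
-- what changed: B replaces A's unbounded max-heap with running-cost sum, retroactive refunds (tmp += popped_max + enemy[i]) and per-wave answer counter by the canonical size-k min-heap greedy: keep the k largest enemies immunized, pay each overflowing minimum from health, return the index of the first unpayable wave; len(enemy) <= k is handled naturally instead of by a special case.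
-- outside the precondition, e.g. on solution(-2, 2, [0, 0, 3, 3]): A returns 0, B returns 2; on solution(0, 1, [1, -1, 2]): A returns 2, B returns 3
import Mathlib
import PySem

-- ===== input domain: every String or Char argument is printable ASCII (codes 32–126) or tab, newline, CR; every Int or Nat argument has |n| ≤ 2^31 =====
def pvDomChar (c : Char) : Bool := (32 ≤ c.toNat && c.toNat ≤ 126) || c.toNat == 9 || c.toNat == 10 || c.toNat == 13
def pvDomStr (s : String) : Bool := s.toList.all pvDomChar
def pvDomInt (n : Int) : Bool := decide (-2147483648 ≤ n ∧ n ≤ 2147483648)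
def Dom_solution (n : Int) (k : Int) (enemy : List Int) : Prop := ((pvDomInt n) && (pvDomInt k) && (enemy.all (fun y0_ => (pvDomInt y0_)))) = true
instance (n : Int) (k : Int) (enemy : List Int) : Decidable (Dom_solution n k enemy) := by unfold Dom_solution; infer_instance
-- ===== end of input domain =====

-- B is the canonical size-k min-heap greedy (keep the k largest waves immunized, pay each
-- overflowing minimum from health) instead of A's unbounded max-heap with retroactive refunds.

-- ===== PORT A =====
-- A's heap pq holds the NEGATED enemy values; heapq push/pop are ported value-faithfully as
-- insertion into an ascending sorted list / removal of its head (= the heap minimum).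
def solGoA (n k : Int) : List Int → List Int → Int → Int → Int → Int
  | [], _pq, _pc, _tmp, ans => ans
  | e :: rest, pq, pc, tmp, ans =>
    let pq' := List.orderedInsert (· ≤ ·) (-e) pq
    if tmp + e ≤ n then
      solGoA n k rest pq' pc (tmp + e) (ans + 1)
    else if pc < k then
      let m := pq'.headI
      let tmp' := tmp + m + e
      solGoA n k rest pq'.tail (pc + 1) tmp' (if tmp' ≤ n then ans + 1 else ans)
    else ans

def solution (n : Int) (k : Int) (enemy : List Int) : Int :=
  if (enemy.length : Int) ≤ k then (enemy.length : Int)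
  else solGoA n k enemy [] 0 0 0

-- ===== PORT B =====
-- i counts the processed waves; at the end of the loop i = len(enemy), the Python return value.
def solGoB (k : Int) : List Int → Int → List Int → Int → Int
  | [], i, _h, _nn => i
  | e :: rest, i, h, nn =>
    let h' := List.orderedInsert (· ≤ ·) e h
    if k < (h'.length : Int) then
      let nn' := nn - h'.headI
      if nn' < 0 then i else solGoB k rest (i + 1) h'.tail nn'
    else solGoB k rest (i + 1) h' nn

def solution_alt (n : Int) (k : Int) (enemy : List Int) : Int :=
  solGoB k enemy 0 [] n

-- ===== PRECONDITION & SPEC =====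
-- Pre_ admits every input on which no immunization choice is ever made (k ≥ len(enemy) or k ≤ 0)
-- and, otherwise, the game's natural domain (nonnegative health and nonnegative per-wave enemy
-- counts); the excluded corner (0 < k < waves with negative health/counts) is where A's lazy
-- refund accounting returns accidental values (refunds can exceed the failing wave) that B does
-- not reproduce.
def Pre_solution (n : Int) (k : Int) (enemy : List Int) : Prop :=
  (enemy.length : Int) ≤ k ∨ k ≤ 0 ∨ (0 ≤ n ∧ ∀ e ∈ enemy, 0 ≤ e)
instance (n : Int) (k : Int) (enemy : List Int) : Decidable (Pre_solution n k enemy) := by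
  unfold Pre_solution; infer_instance

def pvWitness_solution : Int × Int × List Int := (7, 1, [3, 5, 2, 4])

def Spec_solution (n : Int) (k : Int) (enemy : List Int) (out : Int) : Prop := out = solution_alt n k enemy
instance (n : Int) (k : Int) (enemy : List Int) (out : Int) : Decidable (Spec_solution n k enemy out) := by unfold Spec_solution; infer_instance

-- ===== CLAIM (what is proved, stated in full; the proofs are below) =====
def Claim_equal_solution : Prop := ∀ (n : Int) (k : Int) (enemy : List Int), Dom_solution n k enemy → Pre_solution n k enemy → Spec_solution n k enemy (solution n k enemy)

-- ===== LEMMAS AND PROOFS =====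

-- head of a sorted list is a lower bound
theorem pvHeadLe {a : Int} {l : List Int} (hs : List.Pairwise (fun x y : Int => x ≤ y) (a :: l)) :
    ∀ x ∈ a :: l, a ≤ x := by
  intro x hx
  rcases List.mem_cons.1 hx with rfl | hx
  · exact le_rfl
  · exact (List.pairwise_cons.1 hs).1 x hx

theorem pvOiSorted (a : Int) {l : List Int} (hs : List.Pairwise (fun x y : Int => x ≤ y) l) :
    List.Pairwise (fun x y : Int => x ≤ y) (List.orderedInsert (· ≤ ·) a l) :=
  List.Pairwise.orderedInsert (r := (· ≤ ·)) a l hs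

theorem pvOiCoe (a : Int) (l : List Int) :
    ((List.orderedInsert (· ≤ ·) a l : List Int) : Multiset Int) = a ::ₘ (l : Multiset Int) :=
  Multiset.coe_eq_coe.2 (List.perm_orderedInsert _ a l)

theorem pvOiNeNil (a : Int) (l : List Int) : List.orderedInsert (· ≤ ·) a l ≠ [] := by
  cases l with
  | nil => simp [List.orderedInsert]
  | cons b t =>
    simp only [List.orderedInsert]
    split <;> simp

theorem pvConsHeadITail {l : List Int} (h : l ≠ []) : l.headI :: l.tail = l := by
  cases l with
  | nil => exact absurd rfl h
  | cons a t => rfl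

-- sum comparison: |U| ≤ |V|, every u ≤ every v, V nonnegative ⇒ ΣU ≤ ΣV
theorem pvSumLe (U : Multiset Int) : ∀ (V : Multiset Int), U.card ≤ V.card →
    (∀ u ∈ U, ∀ v ∈ V, u ≤ v) → (∀ v ∈ V, 0 ≤ v) → U.sum ≤ V.sum := by
  induction U using Multiset.induction with
  | empty =>
    intro V _ _ hV
    simpa using Multiset.sum_nonneg hV
  | cons a U ih =>
    intro V hc hle hV
    have hVne : V ≠ 0 := by
      intro h0; rw [h0] at hc; simp at hc
    obtain ⟨v, hv⟩ := Multiset.exists_mem_of_ne_zero hVne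
    have hVe : v ::ₘ V.erase v = V := Multiset.cons_erase hv
    have hrec : U.sum ≤ (V.erase v).sum := by
      apply ih
      · rw [Multiset.card_erase_of_mem hv, Nat.pred_eq_sub_one]
        have hpos : 0 < Multiset.card V := Multiset.card_pos.2 hVne
        rw [Multiset.card_cons] at hc
        omega
      · intro u hu w hw
        exact hle u (Multiset.mem_cons_of_mem hu) w (Multiset.mem_of_mem_erase hw)
      · intro w hw
        exact hV w (Multiset.mem_of_mem_erase hw)
    have hav : a ≤ v := hle a (Multiset.mem_cons_self a U) v hv
    calc (a ::ₘ U).sum = a + U.sum := Multiset.sum_cons a U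
    _ ≤ v + (V.erase v).sum := by exact add_le_add hav hrec
    _ = (v ::ₘ V.erase v).sum := (Multiset.sum_cons v _).symm
    _ = V.sum := by rw [hVe]

-- if Y is an elementwise-top part of S, any sub-multiset X of S with |X| ≤ |Y| has ΣX ≤ ΣY
theorem pvTopSum (S X Y : Multiset Int) (hX : X ≤ S) (hY : Y ≤ S)
    (htop : ∀ x ∈ S - Y, ∀ y ∈ Y, x ≤ y) (hS : ∀ v ∈ S, (0:Int) ≤ v)
    (hc : X.card ≤ Y.card) : X.sum ≤ Y.sum := by
  have hx1 : X - Y + X ∩ Y = X := Multiset.sub_add_inter X Y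
  have hy1 : Y - X + Y ∩ X = Y := Multiset.sub_add_inter Y X
  have hinter : X ∩ Y = Y ∩ X := Multiset.inter_comm X Y
  have hcard : (X - Y).card ≤ (Y - X).card := by
    have c1 : (X - Y).card + (X ∩ Y).card = X.card := by
      rw [← Multiset.card_add, hx1]
    have c2 : (Y - X).card + (Y ∩ X).card = Y.card := by
      rw [← Multiset.card_add, hy1]
    rw [hinter] at c1
    omega
  have hsub : X - Y ≤ S - Y := tsub_le_tsub_right hX Y
  have hkey : (X - Y).sum ≤ (Y - X).sum := by
    apply pvSumLe
    · exact hcard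
    · intro u hu v hv
      exact htop u (Multiset.mem_of_le hsub hu) v (Multiset.mem_of_le (tsub_le_self) hv)
    · intro v hv
      exact hS v (Multiset.mem_of_le (le_trans tsub_le_self hY) hv)
  have sx : X.sum = (X - Y).sum + (X ∩ Y).sum := by rw [← Multiset.sum_add, hx1]
  have sy : Y.sum = (Y - X).sum + (Y ∩ X).sum := by rw [← Multiset.sum_add, hy1]
  rw [sx, sy, hinter]
  exact add_le_add hkey le_rfl

-- B's single loop step, with its invariants re-established
theorem pvBstep (k e : Int) (S D : Multiset Int) (h : List Int)
    (hB1 : (h : Multiset Int) + D = S)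
    (hB3 : ∀ x ∈ D, ∀ y ∈ h, x ≤ y)
    (hB4 : (h.length : Int) = min ((Multiset.card S : Int)) (max k 0))
    (hsort : List.Pairwise (fun x y : Int => x ≤ y) h) :
    ∃ (h₂ : List Int) (D₂ : Multiset Int),
      (↑h₂ : Multiset Int) + D₂ = (e ::ₘ S) ∧
      (∀ x ∈ D₂, ∀ y ∈ h₂, x ≤ y) ∧
      ((h₂.length : Int) = min ((Multiset.card (e ::ₘ S) : Int)) (max k 0)) ∧
      List.Pairwise (fun x y : Int => x ≤ y) h₂ ∧
      (((h.length : Int) + 1 ≤ k ∧ D₂ = D) ∨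
        (k < (h.length : Int) + 1 ∧
          D₂ = (List.orderedInsert (· ≤ ·) e h).headI ::ₘ D ∧
          ((List.orderedInsert (· ≤ ·) e h).headI = e ∨
            (List.orderedInsert (· ≤ ·) e h).headI ∈ h) ∧
          (∀ y ∈ e ::ₘ (h : Multiset Int), (List.orderedInsert (· ≤ ·) e h).headI ≤ y))) ∧
      (∀ (rest : List Int) (i nn : Int), 0 ≤ nn →
        solGoB k (e :: rest) i h nn =
          if nn - (D₂.sum - D.sum) < 0 then i
          else solGoB k rest (i + 1) h₂ (nn - (D₂.sum - D.sum))) := by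
  classical
  set h' := List.orderedInsert (· ≤ ·) e h with hh'
  have hlen' : h'.length = h.length + 1 := by rw [hh', List.orderedInsert_length]
  have hcoe' : (h' : Multiset Int) = e ::ₘ (h : Multiset Int) := pvOiCoe e h
  have hsort' : List.Pairwise (fun x y : Int => x ≤ y) h' := pvOiSorted e hsort
  have hne : h' ≠ [] := pvOiNeNil e h
  have hht : h'.headI :: h'.tail = h' := pvConsHeadITail hne
  have hpmin : ∀ y ∈ (e ::ₘ (h : Multiset Int)), h'.headI ≤ y := by
    intro y hy
    rw [← hcoe'] at hy
    have hs : List.Pairwise (fun x y : Int => x ≤ y) (h'.headI :: h'.tail) := by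
      rw [hht]; exact hsort'
    exact pvHeadLe hs y (by rw [hht]; exact Multiset.mem_coe.1 hy)
  have hhead : h'.headI = e ∨ h'.headI ∈ h := by
    have hm : h'.headI ∈ h' := by rw [← hht]; exact List.mem_cons_self
    have : h'.headI ∈ (e ::ₘ (h : Multiset Int)) := by
      rw [← hcoe']; exact Multiset.mem_coe.2 hm
    rcases Multiset.mem_cons.1 this with h1 | h1
    · exact Or.inl h1
    · exact Or.inr (Multiset.mem_coe.1 h1)
  have htailcoe : (h'.tail : Multiset Int) = (e ::ₘ (h : Multiset Int)).erase h'.headI := by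
    have h1 : (h' : Multiset Int) = h'.headI ::ₘ (h'.tail : Multiset Int) := by
      rw [Multiset.cons_coe, hht]
    rw [← hcoe', h1, Multiset.erase_cons_head]
  by_cases hov : k < (h'.length : Int)
  · -- overflow: pop the head
    refine ⟨h'.tail, h'.headI ::ₘ D, ?_, ?_, ?_, ?_, ?_, ?_⟩
    · calc (h'.tail : Multiset Int) + (h'.headI ::ₘ D)
          = (h'.headI ::ₘ (h'.tail : Multiset Int)) + D := by
            rw [Multiset.add_cons, Multiset.cons_add]
      _ = (h' : Multiset Int) + D := by
            have hcc : (h'.headI ::ₘ (h'.tail : Multiset Int)) = (h' : Multiset Int) := by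
              rw [Multiset.cons_coe, hht]
            rw [hcc]
      _ = e ::ₘ S := by rw [hcoe', Multiset.cons_add, hB1]
    · -- dropped ≤ kept
      intro x hx y hy
      have hyh' : y ∈ h' := by rw [← hht]; exact List.mem_cons_of_mem _ hy
      have hyc : y ∈ (e ::ₘ (h : Multiset Int)) := by
        rw [← hcoe']; exact Multiset.mem_coe.2 hyh'
      rcases Multiset.mem_cons.1 hx with hxp | hxD
      · rw [hxp]
        exact hpmin y hyc
      · rcases Multiset.mem_cons.1 hyc with hye | hyh
        · -- y = e (as a value)
          rcases hhead with hpe | hph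
          · -- head = e: tail multiset = h, so y is really in h
            have htm : (h'.tail : Multiset Int) = (h : Multiset Int) := by
              rw [htailcoe, hpe, Multiset.erase_cons_head]
            have : y ∈ (h : Multiset Int) := by
              rw [← htm]; exact Multiset.mem_coe.2 hy
            exact hB3 x hxD y (Multiset.mem_coe.1 this)
          · -- head ∈ h: x ≤ head ≤ e = y
            have h1 : x ≤ h'.headI := hB3 x hxD _ hph
            have h2 : h'.headI ≤ e := hpmin e (Multiset.mem_cons_self e _)
            rw [hye]; omega
        · exact hB3 x hxD y (Multiset.mem_coe.1 hyh)
    · -- length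
      have htl : h'.tail.length + 1 = h'.length := by
        conv_rhs => rw [← hht]
        simp
      rw [Multiset.card_cons]
      push_cast
      omega
    · have hs : List.Pairwise (fun x y : Int => x ≤ y) (h'.headI :: h'.tail) := by
        rw [hht]; exact hsort'
      exact hs.of_cons
    · exact Or.inr ⟨by omega, rfl, hhead, hpmin⟩
    · intro rest i nn _
      show solGoB k (e :: rest) i h nn = _
      simp only [solGoB]
      rw [← hh', if_pos hov]
      have hsum : (h'.headI ::ₘ D).sum - D.sum = h'.headI := by
        rw [Multiset.sum_cons]; ring
      rw [hsum]
      all_goals first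
        | rfl
        | (split <;> split <;> first | rfl | omega)
  · -- no overflow
    have hD0 : D = 0 := by
      have hcards : Multiset.card ((h : Multiset Int) + D) = Multiset.card S := by rw [hB1]
      rw [Multiset.card_add, Multiset.coe_card] at hcards
      rw [hlen'] at hov
      push_neg at hov
      rw [← Multiset.card_eq_zero]
      omega
    refine ⟨h', D, ?_, ?_, ?_, hsort', Or.inl ⟨by omega, rfl⟩, ?_⟩
    · rw [hcoe', Multiset.cons_add, hB1]
    · intro x hx
      rw [hD0] at hx
      exact absurd hx (Multiset.notMem_zero x)
    · rw [hlen'] at hov ⊢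
      push_neg at hov
      rw [Multiset.card_cons]
      push_cast
      omega
    · intro rest i nn hnn
      show solGoB k (e :: rest) i h nn = _
      simp only [solGoB]
      rw [← hh', if_neg hov]
      have hz : nn - (D.sum - D.sum) = nn := by ring
      rw [hz, if_neg (by omega)]


-- the countP argument: if P is a top part and h a top part of the same S with |h| = |P|,
-- the head of h is ≥ the minimum μ of P
theorem pvHeadGeMu (S P : Multiset Int) (pqv : Multiset Int) (D : Multiset Int)
    (h0 : Int) (ht : List Int) (μ : Int)
    (hA1 : pqv + P = S) (hB1 : (↑(h0 :: ht) : Multiset Int) + D = S)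
    (hA5 : ∀ x ∈ pqv, x ≤ μ)
    (hμ : μ ∈ P) (hμlb : ∀ y ∈ P, μ ≤ y)
    (hB3 : ∀ x ∈ D, ∀ y ∈ (h0 :: ht : List Int), x ≤ y)
    (hsort : List.Pairwise (fun x y : Int => x ≤ y) (h0 :: ht))
    (hcard : Multiset.card P = (h0 :: ht : List Int).length) :
    μ ≤ h0 := by
  classical
  by_contra hlt
  push_neg at hlt
  -- count elements ≥ μ
  set p : Int → Prop := fun x => μ ≤ x with hp
  have hcount1 : Multiset.countP p P = Multiset.card P :=
    Multiset.countP_eq_card.2 (fun a ha => hμlb a ha)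
  have hS1 : Multiset.card P ≤ Multiset.countP p S := by
    rw [← hA1, Multiset.countP_add]
    omega
  have hD0 : Multiset.countP p D = 0 := by
    rw [Multiset.countP_eq_zero]
    intro a ha
    have : a ≤ h0 := hB3 a ha h0 (List.mem_cons_self)
    simp only [hp]
    omega
  have hhle : Multiset.countP p (↑(h0 :: ht) : Multiset Int) ≤ ht.length := by
    have hcons : (↑(h0 :: ht) : Multiset Int) = h0 ::ₘ (ht : Multiset Int) := rfl
    have hnp : ¬ p h0 := by simp only [hp]; omega
    rw [hcons, Multiset.countP_cons, if_neg hnp]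
    have h1 : Multiset.countP p (ht : Multiset Int) ≤ Multiset.card (ht : Multiset Int) :=
      Multiset.countP_le_card p _
    rw [Multiset.coe_card] at h1
    omega
  have hS2 : Multiset.countP p S ≤ ht.length := by
    rw [← hB1, Multiset.countP_add]
    omega
  simp only [List.length_cons] at hcard
  omega

-- the main coupled-invariant induction
theorem pvMain (n k : Int) (hn : 0 ≤ n) :
    ∀ (rest : List Int) (S P : Multiset Int) (pq : List Int) (pc tmp : Int)
      (h : List Int) (D : Multiset Int) (i : Int),
      (∀ x ∈ rest, (0:Int) ≤ x) →
      (∀ x ∈ S, (0:Int) ≤ x) →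
      (↑(pq.map (fun x => -x)) : Multiset Int) + P = S →
      ((Multiset.card P : Int) = pc) →
      tmp = S.sum - P.sum →
      tmp ≤ n →
      (∀ x ∈ pq, ∀ y ∈ P, -x ≤ y) →
      (P = 0 ∨ ∃ μ, μ ∈ P ∧ (∀ y ∈ P, μ ≤ y) ∧ n < tmp + μ) →
      pc ≤ max k 0 →
      List.Pairwise (fun x y : Int => x ≤ y) pq →
      ((h : Multiset Int) + D = S) →
      (∀ x ∈ D, ∀ y ∈ h, x ≤ y) →
      ((h.length : Int) = min ((Multiset.card S : Int)) (max k 0)) →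
      D.sum ≤ n →
      List.Pairwise (fun x y : Int => x ≤ y) h →
      solGoA n k rest pq pc tmp i = solGoB k rest i h (n - D.sum) := by
  intro rest
  induction rest with
  | nil =>
    intro S P pq pc tmp h D i _ _ _ _ _ _ _ _ _ _ _ _ _ _ _
    simp [solGoA, solGoB]
  | cons e rest ih =>
    intro S P pq pc tmp h D i hrest hS0 hA1 hA2 hA3 hA4 hA5 hA6 hA7 hApq hB1 hB3 hB4 hB5 hBs
    have he0 : (0:Int) ≤ e := hrest e (List.mem_cons_self)
    have hrest' : ∀ x ∈ rest, (0:Int) ≤ x := fun x hx => hrest x (List.mem_cons_of_mem _ hx)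
    have hS0' : ∀ x ∈ (e ::ₘ S), (0:Int) ≤ x := by
      intro x hx
      rcases Multiset.mem_cons.1 hx with rfl | hx
      · exact he0
      · exact hS0 x hx
    have hPle : P ≤ S := by rw [← hA1]; exact self_le_add_left _ _
    obtain ⟨h₂, D₂, hB1₂, hB3₂, hB4₂, hBs₂, hpop, hrun⟩ :=
      pvBstep k e S D h hB1 hB3 hB4 hBs
    have htop₂ : ∀ x ∈ (e ::ₘ S) - (h₂ : Multiset Int), ∀ y ∈ (h₂ : Multiset Int), x ≤ y := by
      have hsub : (e ::ₘ S) - (h₂ : Multiset Int) = D₂ := by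
        rw [← hB1₂]; rw [add_comm]; exact Multiset.add_sub_cancel_right
      rw [hsub]
      intro x hx y hy
      exact hB3₂ x hx y (Multiset.mem_coe.1 hy)
    have hh₂le : (h₂ : Multiset Int) ≤ e ::ₘ S := by
      rw [← hB1₂]; exact self_le_add_right _ _
    have hd2sum : D₂.sum = (e ::ₘ S).sum - ((h₂ : Multiset Int)).sum := by
      have : ((h₂ : Multiset Int)).sum + D₂.sum = (e ::ₘ S).sum := by
        rw [← Multiset.sum_add, hB1₂]
      omega
    -- generic bound: for any Q ≤ e::ₘS that is nonneg-compatible with card ≤ card h₂,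
    -- D₂.sum ≤ (e::ₘS).sum - Q.sum
    have hbound : ∀ Q : Multiset Int, Q ≤ e ::ₘ S →
        (Multiset.card Q : Int) ≤ (h₂.length : Int) → D₂.sum ≤ (e ::ₘ S).sum - Q.sum := by
      intro Q hQle hQc
      have : Q.sum ≤ ((h₂ : Multiset Int)).sum := by
        apply pvTopSum (e ::ₘ S) Q (h₂ : Multiset Int) hQle hh₂le htop₂ hS0'
        rw [Multiset.coe_card]
        omega
      omega
    have hcardS : (Multiset.card P : Int) ≤ (Multiset.card S : Int) := by
      exact_mod_cast Multiset.card_le_card hPle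
    simp only [solGoA]
    by_cases hacc : tmp + e ≤ n
    · -- ACCEPT branch
      rw [if_pos hacc]
      -- B survives: D₂.sum ≤ n
      have hPle' : P ≤ e ::ₘ S := le_trans hPle (Multiset.le_cons_self S e)
      have hPc : (Multiset.card P : Int) ≤ (h₂.length : Int) := by
        rw [hB4₂, Multiset.card_cons]
        push_cast
        omega
      have hD₂n : D₂.sum ≤ n := by
        have := hbound P hPle' hPc
        have hs' : (e ::ₘ S).sum = e + S.sum := Multiset.sum_cons e S
        omega
      rw [hrun rest i (n - D.sum) (by omega)]
      rw [if_neg (by omega)]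
      have harr : n - D.sum - (D₂.sum - D.sum) = n - D₂.sum := by ring
      rw [harr]
      -- re-establish A invariants and recurse
      have hA5' : ∀ x ∈ List.orderedInsert (· ≤ ·) (-e) pq, ∀ y ∈ P, -x ≤ y := by
        intro x hx y hy
        have hx' : x ∈ (-e) :: pq := (List.mem_orderedInsert _).1 hx |>.elim
          (fun hh => by rw [hh]; exact List.mem_cons_self) (fun hh => List.mem_cons_of_mem _ hh)
        rcases List.mem_cons.1 hx' with rfl | hx''
        · -- new element: need e ≤ y; from hA6 since tmp + e ≤ n < tmp + μ
          rcases hA6 with hP0 | ⟨μ, hμ, hμlb, hμn⟩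
          · rw [hP0] at hy; exact (Multiset.notMem_zero y hy).elim
          · have : e < μ := by omega
            simp only [neg_neg]
            have := hμlb y hy
            omega
        · exact hA5 x hx'' y hy
      apply ih (e ::ₘ S) P (List.orderedInsert (· ≤ ·) (-e) pq) pc (tmp + e) h₂ D₂ (i + 1)
        hrest' hS0' ?_ hA2 ?_ hacc hA5' ?_ hA7 (pvOiSorted _ hApq) hB1₂ hB3₂ hB4₂ hD₂n hBs₂
      · -- multiset equation
        have : List.Perm ((List.orderedInsert (· ≤ ·) (-e) pq).map (fun x => -x))
            (e :: pq.map (fun x => -x)) := by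
          have h1 : List.Perm (List.orderedInsert (· ≤ ·) (-e) pq) ((-e) :: pq) :=
            List.perm_orderedInsert _ _ _
          have h2 := h1.map (fun x : Int => -x)
          simpa using h2
        have hcoe : (↑((List.orderedInsert (· ≤ ·) (-e) pq).map (fun x => -x)) : Multiset Int)
            = e ::ₘ (↑(pq.map (fun x => -x)) : Multiset Int) := by
          exact Multiset.coe_eq_coe.2 this
        rw [hcoe, Multiset.cons_add, hA1]
      · have : (e ::ₘ S).sum = e + S.sum := Multiset.sum_cons e S
        omega
      · rcases hA6 with hP0 | ⟨μ, hμ, hμlb, hμn⟩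
        · exact Or.inl hP0
        · exact Or.inr ⟨μ, hμ, hμlb, by omega⟩
    · rw [if_neg hacc]
      push_neg at hacc
      by_cases hpass : pc < k
      · -- PASS branch
        rw [if_pos hpass]
        set pq' := List.orderedInsert (· ≤ ·) (-e) pq with hpq'
        have hpq'perm : List.Perm (pq'.map (fun x => -x)) (e :: pq.map (fun x => -x)) := by
          have h1 : List.Perm pq' ((-e) :: pq) := List.perm_orderedInsert _ _ _
          have h2 := h1.map (fun x : Int => -x)
          simpa using h2
        have hpq'coe : (↑(pq'.map (fun x => -x)) : Multiset Int)
            = e ::ₘ (↑(pq.map (fun x => -x)) : Multiset Int) :=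
          Multiset.coe_eq_coe.2 hpq'perm
        have hpq'sort : List.Pairwise (fun x y : Int => x ≤ y) pq' := pvOiSorted _ hApq
        have hpq'ne : pq' ≠ [] := pvOiNeNil _ _
        have hht : pq'.headI :: pq'.tail = pq' := pvConsHeadITail hpq'ne
        set m := pq'.headI with hm
        -- m is ≤ every element of pq', so -m = M is ≥ every value
        have hmmin : ∀ x ∈ pq', m ≤ x := by
          have := pvHeadLe (a := m) (l := pq'.tail) (by rw [hht]; exact hpq'sort)
          intro x hx; exact this x (by rw [hht]; exact hx)
        have hmmem : m ∈ pq' := by rw [← hht]; exact List.mem_cons_self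
        -- values multiset V = e ::ₘ pqv; -m ∈ V and -m is max of V
        have hVtail : (↑(pq'.tail.map (fun x => -x)) : Multiset Int) =
            (e ::ₘ (↑(pq.map (fun x => -x)) : Multiset Int)).erase (-m) := by
          have h1 : (↑(pq'.map (fun x => -x)) : Multiset Int)
              = (-m) ::ₘ (↑(pq'.tail.map (fun x => -x)) : Multiset Int) := by
            conv_lhs => rw [← hht]
            rfl
          rw [← hpq'coe, h1, Multiset.erase_cons_head]
        have hMmem : (-m) ∈ (e ::ₘ (↑(pq.map (fun x => -x)) : Multiset Int)) := by
          rw [← hpq'coe]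
          exact Multiset.mem_coe.2 (List.mem_map.2 ⟨m, hmmem, rfl⟩)
        have hMmax : ∀ y ∈ (e ::ₘ (↑(pq.map (fun x => -x)) : Multiset Int)), y ≤ -m := by
          intro y hy
          rw [← hpq'coe] at hy
          obtain ⟨x, hxm, rfl⟩ := List.mem_map.1 (Multiset.mem_coe.1 hy)
          have := hmmin x hxm
          omega
        have hMe : e ≤ -m := hMmax e (Multiset.mem_cons_self e _)
        have htmp' : tmp + m + e ≤ n := by omega
        rw [if_pos htmp']
        -- B side survives with P' = (-m) ::ₘ P
        set P' : Multiset Int := (-m) ::ₘ P with hP'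
        have hA1' : (↑(pq'.tail.map (fun x => -x)) : Multiset Int) + P' = e ::ₘ S := by
          rw [hVtail, hP']
          have : (-m) ::ₘ ((e ::ₘ (↑(pq.map (fun x => -x)) : Multiset Int)).erase (-m))
              = e ::ₘ (↑(pq.map (fun x => -x)) : Multiset Int) :=
            Multiset.cons_erase hMmem
          calc (e ::ₘ (↑(pq.map (fun x => -x)) : Multiset Int)).erase (-m) + ((-m) ::ₘ P)
              = ((-m) ::ₘ ((e ::ₘ (↑(pq.map (fun x => -x)) : Multiset Int)).erase (-m))) + P := by
                rw [Multiset.add_cons, Multiset.cons_add]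
          _ = (e ::ₘ (↑(pq.map (fun x => -x)) : Multiset Int)) + P := by rw [this]
          _ = e ::ₘ S := by rw [Multiset.cons_add, hA1]
        have hP'le : P' ≤ e ::ₘ S := by rw [← hA1']; exact self_le_add_left _ _
        have hkpos : 0 < k := by
          have : (0:Int) ≤ pc := by rw [← hA2]; positivity
          omega
        have hP'c : (Multiset.card P' : Int) = pc + 1 := by
          rw [hP', Multiset.card_cons]; push_cast; omega
        have hP'card : (Multiset.card P' : Int) ≤ (h₂.length : Int) := by
          have hcc : (Multiset.card (e ::ₘ S) : Int) = (Multiset.card S : Int) + 1 := by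
            rw [Multiset.card_cons]; push_cast; ring
          rw [hB4₂, hcc]
          omega
        have hD₂n : D₂.sum ≤ n := by
          have := hbound P' hP'le hP'card
          have hs' : (e ::ₘ S).sum = e + S.sum := Multiset.sum_cons e S
          have hp's : P'.sum = -m + P.sum := by rw [hP', Multiset.sum_cons]
          omega
        rw [hrun rest i (n - D.sum) (by omega)]
        rw [if_neg (by omega)]
        have harr : n - D.sum - (D₂.sum - D.sum) = n - D₂.sum := by ring
        rw [harr]
        -- recurse
        apply ih (e ::ₘ S) P' pq'.tail (pc + 1) (tmp + m + e) h₂ D₂ (i + 1)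
          hrest' hS0' hA1' ?_ ?_ htmp' ?_ ?_ ?_ ?_ hB1₂ hB3₂ hB4₂ hD₂n hBs₂
        · exact_mod_cast hP'c
        · have hs' : (e ::ₘ S).sum = e + S.sum := Multiset.sum_cons e S
          have hp's : P'.sum = -m + P.sum := by rw [hP', Multiset.sum_cons]
          omega
        · -- hA5: remaining ≤ every member of P'
          intro x hx y hy
          rcases Multiset.mem_cons.1 (by rw [hP'] at hy; exact hy) with rfl | hyP
          · -- y = -m : every remaining value ≤ -m
            have hx' : x ∈ pq' := by rw [← hht]; exact List.mem_cons_of_mem _ hx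
            have : (-x) ∈ (e ::ₘ (↑(pq.map (fun x => -x)) : Multiset Int)) := by
              rw [← hpq'coe]
              exact Multiset.mem_coe.2 (List.mem_map.2 ⟨x, hx', rfl⟩)
            exact hMmax _ this
          · -- y ∈ P
            rcases hA6 with hP0 | ⟨μ, hμ, hμlb, hμn⟩
            · rw [hP0] at hyP; exact (Multiset.notMem_zero y hyP).elim
            · by_cases hcase : -m ≤ μ
              · -- old pq elements ≤ μ ≤ y and all values ≤ -m ≤ μ
                have hx' : x ∈ pq' := by rw [← hht]; exact List.mem_cons_of_mem _ hx
                have : (-x) ≤ -m := by have := hmmin x hx'; omega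
                have := hμlb y hyP
                omega
              · -- μ < -m : then -m = e and the tail values are the old pq values
                push_neg at hcase
                -- every old value ≤ μ < -m, and e ≤ -m; -m is a value, so -m = e
                have hMe' : -m = e := by
                  rcases Multiset.mem_cons.1 hMmem with h1 | h1
                  · exact h1
                  · exfalso
                    obtain ⟨x', hx', hxm⟩ := List.mem_map.1 (Multiset.mem_coe.1 h1)
                    have := hA5 x' hx' μ hμ
                    omega
                -- tail values = old pq values (cancel e)
                have htv : (↑(pq'.tail.map (fun x => -x)) : Multiset Int)
                    = (↑(pq.map (fun x => -x)) : Multiset Int) := by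
                  rw [hVtail, hMe', Multiset.erase_cons_head]
                have hxv : (-x) ∈ (↑(pq.map (fun x => -x)) : Multiset Int) := by
                  rw [← htv]
                  exact Multiset.mem_coe.2 (List.mem_map.2 ⟨x, hx, rfl⟩)
                obtain ⟨x', hx', hxx⟩ := List.mem_map.1 (Multiset.mem_coe.1 hxv)
                have := hA5 x' hx' y hyP
                rw [hxx] at this
                exact this
        · -- hA6 for P'
          right
          rcases hA6 with hP0 | ⟨μ, hμ, hμlb, hμn⟩
          · refine ⟨-m, Multiset.mem_cons_self _ _, ?_, by omega⟩
            intro y hy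
            rcases Multiset.mem_cons.1 hy with rfl | hyP
            · exact le_rfl
            · rw [hP0] at hyP; exact (Multiset.notMem_zero y hyP).elim
          · by_cases hcase : -m ≤ μ
            · refine ⟨-m, Multiset.mem_cons_self _ _, ?_, by omega⟩
              intro y hy
              rcases Multiset.mem_cons.1 hy with rfl | hyP
              · exact le_rfl
              · exact le_trans hcase (hμlb y hyP)
            · push_neg at hcase
              -- -m = e (as in hA5 above)
              have hMe' : -m = e := by
                rcases Multiset.mem_cons.1 hMmem with h1 | h1
                · exact h1
                · exfalso
                  obtain ⟨x', hx', hxm⟩ := List.mem_map.1 (Multiset.mem_coe.1 h1)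
                  have := hA5 x' hx' μ hμ
                  omega
              refine ⟨μ, Multiset.mem_cons_of_mem hμ, ?_, by omega⟩
              intro y hy
              rcases Multiset.mem_cons.1 hy with rfl | hyP
              · omega
              · exact hμlb y hyP
        · omega
        · -- tail sorted
          rw [← hht] at hpq'sort
          exact hpq'sort.of_cons
      · -- BREAK branch: A returns i; show B dies
        rw [if_neg hpass]
        push_neg at hpass
        have hpc0 : (0:Int) ≤ pc := by rw [← hA2]; positivity
        rcases hpop with ⟨hnov, _⟩ | ⟨hov, hD₂, hhead, hheadmin⟩
        · -- no overflow is impossible at break: len h + 1 ≤ k needs card P = pc ≥ k > len h ≥ ...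
          exfalso
          -- k ≤ pc ≤ max k 0 and len h = min (card S) (max k 0) ≥ ... 
          -- no-overflow: len h + 1 ≤ k, so k ≥ 1, max k 0 = k, len h ≤ k - 1,
          -- so min (card S) k ≤ k - 1, so card S ≤ k - 1 < k ≤ pc = card P ≤ card S
          omega
        · -- overflow: need n - D.sum - head < 0
          set p := (List.orderedInsert (· ≤ ·) e h).headI with hp
          have hDsum : D₂.sum - D.sum = p := by
            rw [hD₂, Multiset.sum_cons]; ring
          rw [hrun rest i (n - D.sum) (by omega)]
          rw [hDsum]
          -- prove n - D.sum - p < 0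
          have hdie : n - D.sum - p < 0 := by
            by_cases hk0 : k ≤ 0
            · -- pc ≤ max k 0 = 0 so P = 0, h = [] so D = S; p = e
              have hpc : pc = 0 := by omega
              have hP0 : P = 0 := by
                rw [← Multiset.card_eq_zero]
                have hz : (Multiset.card P : Int) = 0 := by omega
                exact_mod_cast hz
              have hh0 : h = [] := by
                have : (h.length : Int) = 0 := by
                  rw [hB4]; omega
                cases h with
                | nil => rfl
                | cons a t =>
                  exfalso
                  rw [List.length_cons] at this
                  push_cast at this
                  omega
              have hpe : p = e := by
                rw [hp, hh0]
                rfl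
              have hD : D = S := by
                rw [hh0] at hB1
                simpa using hB1
              have : tmp = S.sum := by
                rw [hA3, hP0]
                simp
              rw [hpe, hD]
              omega
            · push_neg at hk0
              have hpck : pc = k := by omega
              -- card P = k ≥ 1, h has length k ≥ 1
              have hcardP : (Multiset.card P : Int) = k := by omega
              have hlenh : (h.length : Int) = k := by
                rw [hB4]
                omega
              -- paid = tmp (both are "sum minus a top-k part")
              have hpqv : ∀ x ∈ (↑(pq.map (fun x => -x)) : Multiset Int), ∀ y ∈ P, x ≤ y := by
                intro x hx y hy
                obtain ⟨x', hx', rfl⟩ := List.mem_map.1 (Multiset.mem_coe.1 hx)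
                exact hA5 x' hx' y hy
              have htopP : ∀ x ∈ S - P, ∀ y ∈ P, x ≤ y := by
                have : S - P = (↑(pq.map (fun x => -x)) : Multiset Int) := by
                  rw [← hA1]; exact Multiset.add_sub_cancel_right
                rw [this]; exact hpqv
              have htoph : ∀ x ∈ S - (h : Multiset Int), ∀ y ∈ (h : Multiset Int), x ≤ y := by
                have : S - (h : Multiset Int) = D := by
                  rw [← hB1, add_comm]; exact Multiset.add_sub_cancel_right
                rw [this]
                intro x hx y hy
                exact hB3 x hx y (Multiset.mem_coe.1 hy)
              have hhle : (h : Multiset Int) ≤ S := by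
                rw [← hB1]; exact self_le_add_right _ _
              have hcards : (Multiset.card (h : Multiset Int) : Int) = (Multiset.card P : Int) := by
                rw [Multiset.coe_card]
                omega
              have hsum1 : P.sum ≤ ((h : Multiset Int)).sum :=
                pvTopSum S P _ hPle hhle htoph hS0 (by omega)
              have hsum2 : ((h : Multiset Int)).sum ≤ P.sum :=
                pvTopSum S _ P hhle hPle htopP hS0 (by omega)
              have hpaidtmp : D.sum = tmp := by
                have : ((h : Multiset Int)).sum + D.sum = S.sum := by
                  rw [← Multiset.sum_add, hB1]
                omega
              -- μ exists: P ≠ 0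
              have hPne : P ≠ 0 := by
                intro h0
                rw [h0] at hcardP
                simp at hcardP
                omega
              rcases hA6 with hP0 | ⟨μ, hμ, hμlb, hμn⟩
              · exact absurd hP0 hPne
              -- p = e or p = h0 ≥ μ
              rcases hhead with hpe | hph
              · rw [hpe]
                omega
              · -- p ∈ h; p is the head of the insert so p ≤ h0; also h sorted so h0 ≤ p: p = value ≥ h0 ≥ μ
                cases hcase : h with
                | nil => rw [hcase] at hlenh; simp at hlenh; omega
                | cons h0 ht =>
                  have hμh0 : μ ≤ h0 := by
                    apply pvHeadGeMu S P (↑(pq.map (fun x => -x)) : Multiset Int) D h0 ht μ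
                      hA1 (by rw [← hcase]; exact hB1)
                      (fun x hx => by
                        obtain ⟨x', hx', rfl⟩ := List.mem_map.1 (Multiset.mem_coe.1 hx)
                        exact hA5 x' hx' μ hμ)
                      hμ hμlb (by rw [← hcase]; exact hB3) (by rw [← hcase]; exact hBs)
                      (by
                        rw [← hcase]
                        have hc2 : (Multiset.card P : Int) = (h.length : Int) := by omega
                        exact_mod_cast hc2)
                  -- h0 ≤ p since p ∈ h and h sorted
                  have hh0p : h0 ≤ p := by
                    rw [hcase] at hph
                    exact pvHeadLe (by rw [← hcase]; rw [hcase]; exact (by rw [hcase] at hBs; exact hBs)) p hph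
                  omega
          rw [if_pos hdie]

-- when len(enemy) ≤ k the heap never overflows and B walks to the end
theorem pvBAll (k : Int) : ∀ (rest : List Int) (i : Int) (h : List Int) (nn : Int),
    (h.length : Int) + (rest.length : Int) ≤ k →
    solGoB k rest i h nn = i + (rest.length : Int) := by
  intro rest
  induction rest with
  | nil => intro i h nn _; simp [solGoB]
  | cons e rest ih =>
    intro i h nn hlen
    simp only [solGoB]
    have hl : (List.orderedInsert (· ≤ ·) e h).length = h.length + 1 := by
      rw [List.orderedInsert_length]
    have hnov : ¬ k < ((List.orderedInsert (· ≤ ·) e h).length : Int) := by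
      rw [hl]
      simp only [List.length_cons] at hlen
      push_cast at hlen ⊢
      omega
    rw [if_neg hnov]
    rw [ih (i + 1) _ nn (by rw [hl]; simp only [List.length_cons] at hlen; push_cast at hlen ⊢; omega)]
    simp only [List.length_cons]
    push_cast
    ring

-- with k ≤ 0 no immunization is ever available: A pays every accepted wave from the running sum
-- and stops at the first failure; B pops every pushed wave and stops when health goes negative
theorem pvNegK (n k : Int) (hk : k ≤ 0) :
    ∀ (rest : List Int) (pq : List Int) (tmp i : Int),
      solGoA n k rest pq 0 tmp i = solGoB k rest i [] (n - tmp) := by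
  intro rest
  induction rest with
  | nil => intro pq tmp i; simp [solGoA, solGoB]
  | cons e rest ih =>
    intro pq tmp i
    simp only [solGoA, solGoB]
    have hoi : List.orderedInsert (· ≤ ·) e ([] : List Int) = [e] := rfl
    rw [hoi]
    have hov : k < (([e] : List Int).length : Int) := by simp; omega
    rw [if_pos hov]
    show _ = if n - tmp - e < 0 then i else solGoB k rest (i + 1) [] (n - tmp - e)
    by_cases hacc : tmp + e ≤ n
    · rw [if_pos hacc, if_neg (by omega : ¬ n - tmp - e < 0)]
      have harr : n - tmp - e = n - (tmp + e) := by ring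
      rw [harr]
      exact ih _ (tmp + e) (i + 1)
    · rw [if_neg hacc, if_neg (by omega : ¬ (0:Int) < k), if_pos (by omega : n - tmp - e < 0)]

-- ===== VERDICT (by name: the statement is the Claim_ definition above) =====
theorem solution_spec : Claim_equal_solution := by
  intro n k enemy _ hpre
  unfold Spec_solution solution solution_alt
  by_cases hk : (enemy.length : Int) ≤ k
  · rw [if_pos hk]
    rw [pvBAll k enemy 0 [] n (by simpa using hk)]
    ring
  · rw [if_neg hk]
    by_cases hk0 : k ≤ 0
    · have := pvNegK n k hk0 enemy [] 0 0
      simpa using this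
    obtain ⟨hn, henemy⟩ : 0 ≤ n ∧ ∀ e ∈ enemy, 0 ≤ e := by
      rcases hpre with h | h | h
      · exact absurd h hk
      · exact absurd h hk0
      · exact h
    have hmain := pvMain n k hn enemy 0 0 [] 0 0 [] 0 0
      henemy (by simp) (by simp) (by simp) (by simp) hn (by simp) (Or.inl rfl)
      (le_max_right k 0) (by simp) (by simp) (by simp) (by simp only [List.length_nil, Multiset.card_zero]; push_cast; omega) (by simpa using hn)
      (by simp)
    simpa using hmain
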